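-- pv_equiv track=rewrite | github.com/ialsina/WiktionaryParser | wiktionaryparser/core.py | _is_subheading
-- ===== SOURCE A (Python) =====
-- def _is_subheading(child, parent):
--     child_headings = child.split(".")
--     parent_headings = parent.split(".")
--     if len(child_headings) <= len(parent_headings):
--         return False
--     for child_heading, parent_heading in zip(child_headings, parent_headings):
--         if child_heading != parent_heading:
--             return False
--     return True
-- ===== SOURCE B (Python) =====
-- def _is_subheading(child, parent):
--     return child.startswith(parent + ".")
-- ===== Notes on version B (the rewrite author's own statement) =====
-- stated objective: idiomatic
-- what changed: Replaces splitting both headings into dot-separated component lists and looping over zipped pairs with a single string-prefix test against parent + '.', which enforces the component boundary and strict depth at once.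
import Mathlib
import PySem

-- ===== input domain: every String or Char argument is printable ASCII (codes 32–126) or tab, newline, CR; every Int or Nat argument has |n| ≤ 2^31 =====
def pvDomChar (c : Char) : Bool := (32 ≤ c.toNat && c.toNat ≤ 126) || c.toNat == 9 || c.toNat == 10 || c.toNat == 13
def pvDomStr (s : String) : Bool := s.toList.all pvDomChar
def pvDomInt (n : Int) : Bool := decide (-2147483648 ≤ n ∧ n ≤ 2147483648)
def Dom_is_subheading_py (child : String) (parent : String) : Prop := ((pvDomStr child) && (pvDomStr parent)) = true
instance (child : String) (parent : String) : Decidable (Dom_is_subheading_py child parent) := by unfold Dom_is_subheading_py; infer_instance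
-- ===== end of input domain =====

-- B replaces A's split-into-components-and-zip-loop by a single prefix test against parent + "." (idiomatic, same cost).


-- ===== PORT A =====
-- the `for child_heading, parent_heading in zip(...)` loop with its early `return False`
def isSubheadingZipLoop : List (List Char × List Char) → Bool
  | [] => true
  | (c, p) :: rest => if c ≠ p then false else isSubheadingZipLoop rest

def is_subheading_py (child : String) (parent : String) : Bool :=
  let child_headings := PySem.Chars.splitOn child.toList ['.']
  let parent_headings := PySem.Chars.splitOn parent.toList ['.']
  if child_headings.length ≤ parent_headings.length then false
  else isSubheadingZipLoop (child_headings.zip parent_headings)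

-- ===== PORT B =====
def is_subheading_py_alt (child : String) (parent : String) : Bool :=
  PySem.Str.startswith child (parent ++ ".")

-- ===== PRECONDITION & SPEC =====
def Spec_is_subheading_py (child : String) (parent : String) (out : Bool) : Prop := out = is_subheading_py_alt child parent
instance (child : String) (parent : String) (out : Bool) : Decidable (Spec_is_subheading_py child parent out) := by unfold Spec_is_subheading_py; infer_instance

-- ===== CLAIM (what is proved, stated in full; the proofs are below) =====
def Claim_equal_is_subheading_py : Prop := ∀ (child : String) (parent : String), Dom_is_subheading_py child parent → Spec_is_subheading_py child parent (is_subheading_py child parent)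

-- ===== LEMMAS AND PROOFS =====

-- proof-side model of splitting on a single '.' character
def dotSplit : List Char → List (List Char)
  | [] => [[]]
  | c :: rest =>
    if c = '.' then [] :: dotSplit rest
    else
      match dotSplit rest with
      | [] => [[c]]   -- unreachable: dotSplit is never empty
      | h :: t => (c :: h) :: t

theorem dotSplit_ne_nil (l : List Char) : dotSplit l ≠ [] := by
  cases l with
  | nil => simp [dotSplit]
  | cons c rest =>
    simp only [dotSplit]
    split
    · simp
    · split <;> simp

theorem splitOn_go_eq (fuel : Nat) : ∀ (l cur : List Char) (acc : List (List Char)) (h : List Char) (t : List (List Char)),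
    l.length < fuel → dotSplit l = h :: t →
    PySem.Chars.splitOn.go ['.'] fuel l cur acc = acc.reverse ++ (cur.reverse ++ h) :: t := by
  induction fuel with
  | zero => intro l cur acc h t hlt; omega
  | succ n ih =>
    intro l cur acc h t hlt hs
    cases l with
    | nil =>
      simp [dotSplit] at hs
      simp [PySem.Chars.splitOn.go, hs.1, hs.2]
    | cons c rest =>
      obtain ⟨h', t', hs'⟩ : ∃ h' t', dotSplit rest = h' :: t' := by
        cases hd : dotSplit rest with
        | nil => exact absurd hd (dotSplit_ne_nil rest)
        | cons a b => exact ⟨a, b, rfl⟩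
      by_cases hc : c = '.'
      · subst hc
        simp [dotSplit] at hs
        have step : PySem.Chars.splitOn.go ['.'] (n+1) ('.'::rest) cur acc
            = PySem.Chars.splitOn.go ['.'] n rest [] (cur.reverse :: acc) := rfl
        obtain ⟨rfl, rfl⟩ := hs
        rw [step, ih rest [] (cur.reverse :: acc) h' t' (by simp at hlt ⊢; omega) hs', hs']
        simp
      · simp [dotSplit, hc, hs'] at hs
        have step : PySem.Chars.splitOn.go ['.'] (n+1) (c::rest) cur acc
            = PySem.Chars.splitOn.go ['.'] n rest (c :: cur) acc := by
          rw [PySem.Chars.splitOn.go.eq_def]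
          simp [List.isPrefixOf, Ne.symm hc]
        obtain ⟨rfl, rfl⟩ := hs
        rw [step, ih rest (c :: cur) acc h' t' (by simp at hlt ⊢; omega) hs']
        simp

theorem splitOn_eq_dotSplit (l : List Char) : PySem.Chars.splitOn l ['.'] = dotSplit l := by
  obtain ⟨h, t, hs⟩ : ∃ h t, dotSplit l = h :: t := by
    cases hd : dotSplit l with
    | nil => exact absurd hd (dotSplit_ne_nil l)
    | cons h t => exact ⟨h, t, rfl⟩
  rw [PySem.Chars.splitOn, splitOn_go_eq (l.length + 1) l [] [] h t (by omega) hs, hs]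
  simp

theorem main_lemma : ∀ (ps cs : List Char),
    (if (dotSplit cs).length ≤ (dotSplit ps).length then false
     else isSubheadingZipLoop ((dotSplit cs).zip (dotSplit ps)))
    = (ps ++ ['.']).isPrefixOf cs := by
  intro ps
  induction ps with
  | nil =>
    intro cs
    cases cs with
    | nil => simp [dotSplit]
    | cons c rest =>
      obtain ⟨h, t, ht⟩ : ∃ h t, dotSplit rest = h :: t := by
        cases hd : dotSplit rest with
        | nil => exact absurd hd (dotSplit_ne_nil rest)
        | cons a b => exact ⟨a, b, rfl⟩
      by_cases hc : c = '.'
      · subst hc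
        simp [dotSplit, ht, isSubheadingZipLoop, List.isPrefixOf]
      · simp only [dotSplit, if_neg hc, ht]
        cases t with
        | nil => simp [List.isPrefixOf, Ne.symm hc]
        | cons a b => simp [isSubheadingZipLoop, List.isPrefixOf, Ne.symm hc]
  | cons p ps' ih =>
    intro cs
    obtain ⟨hp, tp, hsp⟩ : ∃ h t, dotSplit ps' = h :: t := by
      cases hd : dotSplit ps' with
      | nil => exact absurd hd (dotSplit_ne_nil ps')
      | cons a b => exact ⟨a, b, rfl⟩
    cases cs with
    | nil =>
      by_cases hpdot : p = '.'
      · subst hpdot; simp [dotSplit]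
      · simp [dotSplit, hpdot, hsp]
    | cons c rest =>
      obtain ⟨h, t, ht⟩ : ∃ h t, dotSplit rest = h :: t := by
        cases hd : dotSplit rest with
        | nil => exact absurd hd (dotSplit_ne_nil rest)
        | cons a b => exact ⟨a, b, rfl⟩
      by_cases hpdot : p = '.'
      · subst hpdot
        by_cases hc : c = '.'
        · subst hc
          have := ih rest
          simp only [dotSplit, List.isPrefixOf, List.cons_append] at this ⊢
          simp only [BEq.rfl, Bool.true_and]
          simpa using this
        · simp [dotSplit, hc, ht, isSubheadingZipLoop, List.isPrefixOf, Ne.symm hc]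
      · by_cases hc : c = '.'
        · subst hc
          simp [dotSplit, hpdot, hsp, isSubheadingZipLoop, List.isPrefixOf]
        · by_cases hcp : c = p
          · subst hcp
            have := ih rest
            simp only [dotSplit, if_neg hc, hsp, ht,
              List.isPrefixOf, List.cons_append] at this ⊢
            simp only [BEq.rfl, Bool.true_and]
            simpa [isSubheadingZipLoop] using this
          · simp [dotSplit, hc, hpdot, hsp, ht, isSubheadingZipLoop,
              List.isPrefixOf, hcp, Ne.symm hcp]

-- ===== VERDICT (by name: the statement is the Claim_ definition above) =====
theorem is_subheading_py_spec : Claim_equal_is_subheading_py := by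
  intro child parent _
  show is_subheading_py child parent = is_subheading_py_alt child parent
  unfold is_subheading_py is_subheading_py_alt
  rw [PySem.Str.startswith_eq]
  rw [show (parent ++ ".").toList = parent.toList ++ ['.'] by simp]
  simp only [splitOn_eq_dotSplit, PySem.Chars.startswith]
  exact main_lemma parent.toList child.toList
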